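-- pv_equiv track=rewrite | github.com/SABAGHhamed/Lateral_Interpretation_GUI | seismic_gui/tsp.py | remove_intersections_segmentation_hard
-- ===== SOURCE A (Python) =====
-- def remove_intersections_segmentation_hard(lines, intersection_points, min_segment_length=2):
--     """Remove all segments containing intersections, keep only clean parts above min_segment_length"""
--     intersection_set = set(intersection_points)
--     cleaned_lines = []
--
--     for line in lines:
--         if not line:
--             continue
--
--         segments = []
--         current_segment = []
--
--         for pt in line:
--             if pt in intersection_set:
--                 if len(current_segment) >= min_segment_length:
--                     segments.append(current_segment)
--                 current_segment = []
--             else: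
--                 current_segment.append(pt)
--
--         if len(current_segment) >= min_segment_length:
--             segments.append(current_segment)
--
--         cleaned_lines.extend(segments)  # Add all valid segments
--
--     return cleaned_lines
-- ===== SOURCE B (Python) =====
-- def remove_intersections_segmentation_hard(lines, intersection_points, min_segment_length=2):
--     """Slice each line at the intersection indices instead of accumulating segments point by point."""
--     hits = set(intersection_points)
--     cleaned_lines = []
--     for line in lines:
--         if not line:
--             continue
--         cuts = [-1] + [i for i, pt in enumerate(line) if pt in hits] + [len(line)]
--         cleaned_lines += [line[a + 1:b] for a, b in zip(cuts, cuts[1:])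
--                           if b - a - 1 >= min_segment_length]
--     return cleaned_lines
-- ===== Notes on version B (the rewrite author's own statement) =====
-- stated objective: alternative
-- what changed: A accumulates each segment point by point with two conditional flush points; B instead computes the list of intersection (cut) indices per line and materializes the segments as slices between consecutive cuts, filtering by slice length arithmetic (b-a-1) without ever building a running segment.
import Mathlib
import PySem

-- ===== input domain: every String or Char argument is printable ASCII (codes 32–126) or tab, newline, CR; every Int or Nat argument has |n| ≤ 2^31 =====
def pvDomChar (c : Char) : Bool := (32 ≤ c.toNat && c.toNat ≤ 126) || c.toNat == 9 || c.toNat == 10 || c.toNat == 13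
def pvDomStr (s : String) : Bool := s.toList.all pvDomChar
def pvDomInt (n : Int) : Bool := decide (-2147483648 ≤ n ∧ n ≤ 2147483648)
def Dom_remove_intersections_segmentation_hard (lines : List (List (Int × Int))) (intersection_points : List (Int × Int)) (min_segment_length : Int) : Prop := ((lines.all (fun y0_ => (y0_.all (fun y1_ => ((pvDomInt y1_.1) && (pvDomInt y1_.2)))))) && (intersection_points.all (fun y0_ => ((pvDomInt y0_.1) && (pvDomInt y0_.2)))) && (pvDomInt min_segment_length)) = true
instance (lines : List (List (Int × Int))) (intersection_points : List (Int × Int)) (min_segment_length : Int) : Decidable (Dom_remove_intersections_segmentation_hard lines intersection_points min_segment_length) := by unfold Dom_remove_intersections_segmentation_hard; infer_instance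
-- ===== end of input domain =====

-- B replaces A's point-by-point accumulator (with its two flush points) by computing the cut
-- indices of each line and slicing between consecutive cuts; objective: alternative decomposition.

-- ===== PORT A =====
def remove_intersections_segmentation_hard (lines : List (List (Int × Int))) (intersection_points : List (Int × Int)) (min_segment_length : Int) : List (List (Int × Int)) :=
  let intersection_set := PySem.Set.ofList intersection_points
  lines.foldl (fun cleaned_lines line =>
    if line = [] then cleaned_lines
    else
      let st := line.foldl
        (fun (st : List (List (Int × Int)) × List (Int × Int)) pt =>
          if PySem.Set.contains intersection_set pt then
            (if min_segment_length ≤ (st.2.length : Int) then st.1 ++ [st.2] else st.1, [])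
          else
            (st.1, st.2 ++ [pt]))
        ([], [])
      let segments := if min_segment_length ≤ (st.2.length : Int) then st.1 ++ [st.2] else st.1
      cleaned_lines ++ segments) []

-- ===== PORT B =====
def remove_intersections_segmentation_hard_alt (lines : List (List (Int × Int))) (intersection_points : List (Int × Int)) (min_segment_length : Int) : List (List (Int × Int)) :=
  let hits := PySem.Set.ofList intersection_points
  lines.foldl (fun cleaned_lines line =>
    if line = [] then cleaned_lines
    else
      let cuts : List Int :=
        [-1] ++ (PySem.List.enumerate line 0).filterMap
                  (fun ip => if PySem.Set.contains hits ip.2 then some ip.1 else none)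
             ++ [(line.length : Int)]
      cleaned_lines ++ (cuts.zip cuts.tail).filterMap
        (fun ab => if min_segment_length ≤ ab.2 - ab.1 - 1
                   then some (PySem.List.slice line (some (ab.1 + 1)) (some ab.2)) else none)) []

-- ===== PRECONDITION & SPEC =====
def Spec_remove_intersections_segmentation_hard (lines : List (List (Int × Int))) (intersection_points : List (Int × Int)) (min_segment_length : Int) (out : List (List (Int × Int))) : Prop := out = remove_intersections_segmentation_hard_alt lines intersection_points min_segment_length
instance (lines : List (List (Int × Int))) (intersection_points : List (Int × Int)) (min_segment_length : Int) (out : List (List (Int × Int))) : Decidable (Spec_remove_intersections_segmentation_hard lines intersection_points min_segment_length out) := by unfold Spec_remove_intersections_segmentation_hard; infer_instance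

-- ===== CLAIM (what is proved, stated in full; the proofs are below) =====
def Claim_equal_remove_intersections_segmentation_hard : Prop := ∀ (lines : List (List (Int × Int))) (intersection_points : List (Int × Int)) (min_segment_length : Int), Dom_remove_intersections_segmentation_hard lines intersection_points min_segment_length → Spec_remove_intersections_segmentation_hard lines intersection_points min_segment_length (remove_intersections_segmentation_hard lines intersection_points min_segment_length)

-- ===== LEMMAS AND PROOFS =====

-- the pieces a line is split into at its intersection points (first piece, later pieces)
def pvPieces (f : (Int × Int) → Bool) : List (Int × Int) → List (Int × Int) × List (List (Int × Int))
  | [] => ([], [])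
  | p :: rest =>
      let ht := pvPieces f rest
      if f p then ([], ht.1 :: ht.2) else (p :: ht.1, ht.2)

-- the intersection indices of a line, enumerated from s
def pvJ (f : (Int × Int) → Bool) (xs : List (Int × Int)) (s : Int) : List Int :=
  (PySem.List.enumerate xs s).filterMap (fun ip => if f ip.2 then some ip.1 else none)

-- B's per-line pair list: for consecutive cuts (a,b), the slice length b-a-1 and the slice
def pvPM (xs : List (Int × Int)) (cuts : List Int) : List (Int × List (Int × Int)) :=
  (cuts.zip cuts.tail).map
    (fun ab => (ab.2 - ab.1 - 1, PySem.List.slice xs (some (ab.1 + 1)) (some ab.2)))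

lemma pvJ_cons (f : (Int × Int) → Bool) (x : Int × Int) (xs : List (Int × Int)) (s : Int) :
    pvJ f (x :: xs) s = if f x then s :: pvJ f xs (s + 1) else pvJ f xs (s + 1) := by
  cases hfx : f x <;> simp [pvJ, PySem.List.enumerate_cons, hfx]

lemma pvJ_shift (f : (Int × Int) → Bool) (xs : List (Int × Int)) : ∀ (s : Int),
    pvJ f xs (s + 1) = (pvJ f xs s).map (· + 1) := by
  induction xs with
  | nil => intro s; simp [pvJ]
  | cons x xs ih => intro s; rw [pvJ_cons, pvJ_cons]; split <;> simp [ih]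

lemma pvJ_nonneg (f : (Int × Int) → Bool) (xs : List (Int × Int)) : ∀ (s x : Int),
    x ∈ pvJ f xs s → s ≤ x := by
  induction xs with
  | nil => intro s x h; simp [pvJ] at h
  | cons y xs ih =>
      intro s x h
      rw [pvJ_cons] at h
      split at h
      · rcases List.mem_cons.1 h with rfl | h
        · omega
        · have := ih (s + 1) x h; omega
      · have := ih (s + 1) x h; omega

lemma pvPM_shift (p : Int × Int) (xs : List (Int × Int)) : ∀ (cuts : List Int),
    (∀ x ∈ cuts, -1 ≤ x) → (∀ x ∈ cuts.tail, 0 ≤ x) →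
    pvPM (p :: xs) (cuts.map (· + 1)) = pvPM xs cuts := by
  intro cuts
  induction cuts with
  | nil => intro _ _; simp [pvPM]
  | cons a cs ih =>
      intro h1 h2
      cases cs with
      | nil => simp [pvPM]
      | cons b cs' =>
          have ha : -1 ≤ a := h1 a (by simp)
          have hb : 0 ≤ b := h2 b (by simp)
          have hstep : PySem.List.slice (p :: xs) (some (a + 1 + 1)) (some (b + 1))
              = PySem.List.slice xs (some (a + 1)) (some b) := by
            rw [PySem.List.slice_toNat _ (by omega) (by omega),
                PySem.List.slice_toNat _ (by omega) (by omega)]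
            have e1 : (a + 1 + 1).toNat = (a + 1).toNat + 1 := by omega
            rw [e1, List.drop_succ_cons]
            congr 1
            omega
          have h2' : ∀ x ∈ b :: cs', 0 ≤ x := h2
          have ihr := ih (fun x hx => by have := h2' x hx; omega)
            (fun x hx => h2' x (List.mem_cons_of_mem b hx))
          simp only [List.map_cons, pvPM, List.tail_cons, List.zip_cons_cons,
            List.map_cons] at ihr ⊢
          refine congrArg₂ List.cons ?_ ihr
          rw [hstep]; congr 1; ring

lemma pvPM_main (f : (Int × Int) → Bool) (xs : List (Int × Int)) :
    pvPM xs ((-1) :: (pvJ f xs 0 ++ [(xs.length : Int)]))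
      = ((pvPieces f xs).1 :: (pvPieces f xs).2).map (fun g => ((g.length : Int), g)) := by
  induction xs with
  | nil => simp [pvPM, pvPieces, pvJ, PySem.List.slice_toNat ([] : List (Int × Int))
      (le_refl (0 : Int)) (le_refl (0 : Int))]
  | cons x xs ih =>
      have hshift : pvJ f xs (0 + 1) = (pvJ f xs 0).map (· + 1) := pvJ_shift f xs 0
      have hLnonneg : ∀ z ∈ pvJ f xs 0 ++ [(xs.length : Int)], 0 ≤ z := by
        intro z hz
        rcases List.mem_append.1 hz with hz | hz
        · exact pvJ_nonneg f xs 0 z hz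
        · simp at hz; omega
      have hlen : ((x :: xs).length : Int) = (xs.length : Int) + 1 := by simp
      cases hfx : f x
      · -- f x = false : the first piece grows by x
        obtain ⟨b, cs, hL⟩ : ∃ b cs, pvJ f xs 0 ++ [(xs.length : Int)] = b :: cs :=
          List.exists_cons_of_ne_nil (by simp)
        have hb : 0 ≤ b := hLnonneg b (hL ▸ List.mem_cons_self ..)
        have hcuts : (-1 : Int) :: (pvJ f (x :: xs) 0 ++ [((x :: xs).length : Int)])
            = -1 :: (b + 1) :: cs.map (· + 1) := by
          rw [pvJ_cons, if_neg (by simp [hfx]), hshift, hlen,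
              show (pvJ f xs 0).map (· + 1) ++ [(xs.length : Int) + 1]
                 = ((pvJ f xs 0 ++ [(xs.length : Int)]).map (· + 1)) by simp, hL]
          simp
        rw [hcuts]
        -- unfold one pair on each side of the IH
        rw [hL] at ih
        simp only [pvPM, List.tail_cons, List.zip_cons_cons, List.map_cons, pvPieces,
          hfx, Bool.false_eq_true, if_false] at ih ⊢
        obtain ⟨hhd, htl⟩ := List.cons.injEq .. ▸ ih
        have hb' : b = (((pvPieces f xs).1).length : Int) := by
          have := congrArg Prod.fst hhd; simpa using this
        have hslice : PySem.List.slice xs (some (-1 + 1)) (some b) = (pvPieces f xs).1 := by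
          have := congrArg Prod.snd hhd; simpa using this
        have hshiftpm : pvPM (x :: xs) ((b :: cs).map (· + 1)) = pvPM xs (b :: cs) := by
          refine pvPM_shift x xs (b :: cs) (fun z hz => by have := hLnonneg z (hL ▸ hz); omega)
            (fun z hz => hLnonneg z (hL ▸ List.mem_cons_of_mem b hz))
        simp only [List.map_cons, pvPM, List.tail_cons] at hshiftpm
        refine congrArg₂ List.cons ?_ (hshiftpm.trans htl)
        have hsl2 : PySem.List.slice (x :: xs) (some (-1 + 1)) (some (b + 1))
            = x :: (pvPieces f xs).1 := by
          rw [PySem.List.slice_toNat _ (by omega) (by omega)]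
          rw [PySem.List.slice_toNat _ (by omega) (by omega)] at hslice
          have e1 : ((-1 : Int) + 1).toNat = 0 := by omega
          have e2 : (b + 1).toNat = b.toNat + 1 := by omega
          rw [e1, e2] at *
          simpa using congrArg (List.cons x) hslice
        rw [hsl2]
        refine congrArg₂ Prod.mk ?_ rfl
        simp only [List.length_cons, hb']
        push_cast
        ring
      · -- f x = true : an empty piece is cut off in front
        have hcuts : (-1 : Int) :: (pvJ f (x :: xs) 0 ++ [((x :: xs).length : Int)])
            = -1 :: ((-1 :: (pvJ f xs 0 ++ [(xs.length : Int)])).map (· + 1)) := by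
          rw [pvJ_cons, if_pos (by simp [hfx]), hshift, hlen]
          simp
        rw [hcuts]
        have hshiftpm := pvPM_shift x xs ((-1) :: (pvJ f xs 0 ++ [(xs.length : Int)]))
          (fun z hz => by rcases List.mem_cons.1 hz with rfl | hz
                          · omega
                          · have := hLnonneg z hz; omega)
          (fun z hz => hLnonneg z hz)
        obtain ⟨b, cs, hL⟩ : ∃ b cs, pvJ f xs 0 ++ [(xs.length : Int)] = b :: cs :=
          List.exists_cons_of_ne_nil (by simp)
        rw [hL] at hshiftpm ih ⊢
        simp only [List.map_cons, pvPM, List.tail_cons, List.zip_cons_cons,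
          pvPieces, hfx, if_true] at hshiftpm ih ⊢
        refine congrArg₂ List.cons ?_ (hshiftpm.trans ih)
        have : PySem.List.slice (x :: xs) (some ((-1 : Int) + 1)) (some ((-1 : Int) + 1))
            = ([] : List (Int × Int)) := by
          rw [PySem.List.slice_toNat _ (by omega) (by omega)]; simp
        rw [this]
        simp

-- A's trailing flush of the current segment
def pvFlush (m : Int) (st : List (List (Int × Int)) × List (Int × Int)) :
    List (List (Int × Int)) :=
  if m ≤ (st.2.length : Int) then st.1 ++ [st.2] else st.1

lemma aLoop (f : (Int × Int) → Bool) (m : Int) (line : List (Int × Int)) :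
    ∀ (segs : List (List (Int × Int))) (cur : List (Int × Int)),
    pvFlush m
      (line.foldl
        (fun st pt => if f pt then
            (if m ≤ (st.2.length : Int) then st.1 ++ [st.2] else st.1, [])
          else (st.1, st.2 ++ [pt])) (segs, cur))
    = segs ++ List.filterMap (fun g => if m ≤ (g.length : Int) then some g else none)
        ((cur ++ (pvPieces f line).1) :: (pvPieces f line).2) := by
  induction line with
  | nil =>
      intro segs cur
      simp only [List.foldl_nil, pvPieces, pvFlush, List.filterMap_cons, List.filterMap_nil,
        List.append_nil]
      split <;> simp
  | cons p rest ih =>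
      intro segs cur
      simp only [List.foldl_cons]
      cases hfp : f p
      · simp only [Bool.false_eq_true, if_false]
        rw [ih segs (cur ++ [p])]
        simp [pvPieces, hfp]
      · simp only [if_true]
        rw [ih (if m ≤ (cur.length : Int) then segs ++ [cur] else segs) []]
        simp only [pvPieces, hfp, if_true, List.nil_append, List.filterMap_cons,
          List.append_nil]
        split <;> simp

lemma line_eq (f : (Int × Int) → Bool) (m : Int) (line : List (Int × Int)) :
    pvFlush m
      (line.foldl
        (fun st pt => if f pt then
            (if m ≤ (st.2.length : Int) then st.1 ++ [st.2] else st.1, [])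
          else (st.1, st.2 ++ [pt])) ([], []))
    = (((-1) :: (pvJ f line 0 ++ [(line.length : Int)])).zip
         ((-1) :: (pvJ f line 0 ++ [(line.length : Int)])).tail).filterMap
        (fun ab => if m ≤ ab.2 - ab.1 - 1
                   then some (PySem.List.slice line (some (ab.1 + 1)) (some ab.2)) else none) := by
  rw [aLoop f m line [] []]
  simp only [List.nil_append]
  have h1 : (((-1 : Int) :: (pvJ f line 0 ++ [(line.length : Int)])).zip
         (((-1 : Int) :: (pvJ f line 0 ++ [(line.length : Int)])).tail)).filterMap
        (fun ab => if m ≤ ab.2 - ab.1 - 1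
                   then some (PySem.List.slice line (some (ab.1 + 1)) (some ab.2)) else none)
      = (pvPM line ((-1) :: (pvJ f line 0 ++ [(line.length : Int)]))).filterMap
          (fun lg => if m ≤ lg.1 then some lg.2 else none) := by
    rw [pvPM, List.filterMap_map]
    rfl
  rw [h1, pvPM_main f line, List.filterMap_map]
  rfl

-- ===== VERDICT (by name: the statement is the Claim_ definition above) =====
theorem remove_intersections_segmentation_hard_spec : Claim_equal_remove_intersections_segmentation_hard := by
  intro lines ips m _
  unfold Spec_remove_intersections_segmentation_hard
  unfold remove_intersections_segmentation_hard remove_intersections_segmentation_hard_alt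
  refine congrArg (fun F => List.foldl F [] lines) ?_
  funext acc line
  by_cases hl : line = []
  · simp only [if_pos hl]
  · simp only [if_neg hl]
    exact congrArg (fun segs => acc ++ segs)
      (line_eq (fun pt => PySem.Set.contains (PySem.Set.ofList ips) pt) m line)
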